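-- pv_equiv track=rewrite | github.com/KuphJr/SecureSecretSplitter | encoder.py | convertKeyListToBase62
-- ===== SOURCE A (Python) =====
-- def convertKeyListToBase62(base10keys):
--     # Converts the base-10 keys into base-62 (alphanumeric) keys.
--     # For the subkey (x, fx) corresponding to each word, x is stored as the first character and the
--     # remaining characters represent fx which is the result of the random polynomial at point x
--     base62 = [["" for w in range(len(base10keys[0]))] for k in range(len(base10keys))]
--     wordNum = 0
--     for keysPerWord in base10keys:
--         keyNum = 0
--         for [x, fx] in keysPerWord:
--             base62[wordNum][keyNum] = convertBase10toBase62(x) + convertBase10toBase62(fx)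
--             keyNum += 1
--         wordNum += 1
--     return base62
--
-- def convertBase10toBase62(x):
--     # Convert x from base-10 to base-62 where:
--     # 0 = A, 1 = B, ... , 25 = Z, 26 = a, 27 = b, ... , 51 = z, 52 = 0, 53 = 1, ... , 61 = 9
--     base62table = ["A","B","C","D","E","F","G","H","I","J","K","L","M","N","O","P","Q","R","S",
--                     "T","U","V","W","X","Y","Z","a","b","c","d","e","f","g","h","i","j","k","l",
--                     "m","n","o","p","q","r","s","t","u","v","w","x","y","z","0","1","2","3","4",
--                     "5","6","7","8","9"]
--     q = x // 62
--     r = x % 62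
--     if q == 0:
--         return base62table[r]
--     else:
--         return convertBase10toBase62(q) + base62table[r]
-- ===== SOURCE B (Python) =====
-- # Iterative base-62 conversion (digit loop + join) and a flat comprehension for the key table.
-- # Pre_ excludes ragged inputs, where A's ""-padding to row 0's length is an artefact of pre-sizing.
--
-- def convertBase10toBase62(x):
--     table = "ABCDEFGHIJKLMNOPQRSTUVWXYZabcdefghijklmnopqrstuvwxyz0123456789"
--     if x == 0:
--         return table[0]
--     digits = []
--     while x > 0:
--         x, r = divmod(x, 62)
--         digits.append(table[r])
--     return ''.join(reversed(digits))
--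
-- def convertKeyListToBase62(base10keys):
--     return [[convertBase10toBase62(x) + convertBase10toBase62(fx) for x, fx in row]
--             for row in base10keys]
-- ===== Notes on version B (the rewrite author's own statement) =====
-- stated objective: idiomatic
-- what changed: convertBase10toBase62 becomes an iterative divmod loop collecting digits and joining them (instead of recursion with string concatenation), and the outer function becomes a flat nested comprehension instead of pre-allocating a 2D list of empty strings and writing into it by index.
-- outside the precondition, e.g. on convertKeyListToBase62([[[1, 2]], []]): A returns [['BC'], ['']], B returns [['BC'], []]
import Mathlib
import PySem

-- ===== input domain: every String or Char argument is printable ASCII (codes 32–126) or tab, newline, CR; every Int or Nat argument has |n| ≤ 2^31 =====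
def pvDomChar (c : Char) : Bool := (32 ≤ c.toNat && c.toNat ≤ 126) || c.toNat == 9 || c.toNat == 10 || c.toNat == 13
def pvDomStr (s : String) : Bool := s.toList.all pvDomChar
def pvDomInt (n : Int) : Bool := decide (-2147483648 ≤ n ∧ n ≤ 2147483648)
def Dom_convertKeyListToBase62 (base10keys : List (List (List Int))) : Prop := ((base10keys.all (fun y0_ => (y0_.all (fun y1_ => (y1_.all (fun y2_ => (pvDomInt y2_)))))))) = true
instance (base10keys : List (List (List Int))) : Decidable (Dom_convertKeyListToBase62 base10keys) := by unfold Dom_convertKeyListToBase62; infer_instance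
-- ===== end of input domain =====

-- B replaces the recursive base-62 conversion by an iterative digit loop and the
-- pre-allocated 2D list written by index by a flat nested comprehension (idiomatic; same cost).

-- ===== PORT A =====
def pvTabA : List String := ["A","B","C","D","E","F","G","H","I","J","K","L","M","N","O","P","Q","R","S",
  "T","U","V","W","X","Y","Z","a","b","c","d","e","f","g","h","i","j","k","l",
  "m","n","o","p","q","r","s","t","u","v","w","x","y","z","0","1","2","3","4",
  "5","6","7","8","9"]

-- A's recursion does not terminate for x < 0 (Python RecursionError); fuel x.toNat + 1
-- is enough for every x ≥ 0, the inputs Pre_ admits.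
def pvConvA : Nat → Int → String
  | 0, _ => ""
  | fuel + 1, x =>
    let q := PySem.Int.floordiv x 62
    let r := PySem.Int.mod x 62
    if q == 0 then (PySem.List.pyGet? pvTabA r).getD ""
    else pvConvA fuel q ++ (PySem.List.pyGet? pvTabA r).getD ""

def convertKeyListToBase62 (base10keys : List (List (List Int))) : List (List String) :=
  let base62 : List (List String) :=
    (PySem.List.pyRange 0 (Int.ofNat base10keys.length) 1).map (fun _ =>
      (PySem.List.pyRange 0 (Int.ofNat ((PySem.List.pyGet? base10keys 0).getD []).length) 1).map (fun _ => ""))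
  (base10keys.foldl (fun (st : List (List String) × Nat) keysPerWord =>
      (st.1.modify st.2 (fun row =>
        (keysPerWord.foldl (fun (st2 : List String × Nat) pair =>
            -- [x, fx] unpacking raises unless the pair has length 2 (excluded by Pre_)
            let x := (PySem.List.pyGet? pair 0).getD 0
            let fx := (PySem.List.pyGet? pair 1).getD 0
            (st2.1.set st2.2 (pvConvA (x.toNat + 1) x ++ pvConvA (fx.toNat + 1) fx), st2.2 + 1))
          (row, 0)).1),
       st.2 + 1))
    (base62, 0)).1

-- ===== PORT B =====
def pvTabB : List Char := "ABCDEFGHIJKLMNOPQRSTUVWXYZabcdefghijklmnopqrstuvwxyz0123456789".toList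

def pvB62Loop (x : Int) (digits : List Char) : List Char :=
  if h : 0 < x then
    pvB62Loop (PySem.Int.floordiv x 62) (digits ++ [pvTabB.getD (PySem.Int.mod x 62).toNat ' '])
  else digits
  termination_by x.toNat
  decreasing_by
    have h62 : PySem.Int.floordiv x 62 = x / 62 := PySem.Int.floordiv_eq_ediv_of_pos (by omega)
    omega

def pvConvB (x : Int) : String :=
  if x == 0 then String.ofList [pvTabB.getD 0 ' ']
  else String.ofList (pvB62Loop x []).reverse

-- one pair's entry in B's comprehension: '[x, fx] unpacking' then the two conversions
def pvPairB (pair : List Int) : String :=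
  match pair with
  | [x, fx] => pvConvB x ++ pvConvB fx
  | _ => ""

def convertKeyListToBase62_alt (base10keys : List (List (List Int))) : List (List String) :=
  base10keys.map (fun row => row.map pvPairB)

-- ===== PRECONDITION & SPEC =====
-- Pre_ excludes inputs where A raises (a pair not of length 2 → ValueError, a row longer than
-- row 0 → IndexError, a negative entry → RecursionError) and ragged inputs with SHORTER rows,
-- where A returns rows padded with "" to row 0's length — an artefact of pre-sizing the 2D list.
def Pre_convertKeyListToBase62 (base10keys : List (List (List Int))) : Prop :=
  ∀ row ∈ base10keys, row.length = (base10keys.headD []).length ∧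
    ∀ p ∈ row, p.length = 2 ∧ ∀ v ∈ p, 0 ≤ v
instance (base10keys : List (List (List Int))) : Decidable (Pre_convertKeyListToBase62 base10keys) := by
  unfold Pre_convertKeyListToBase62; infer_instance

def pvWitness_convertKeyListToBase62 : List (List (List Int)) := [[[1, 2], [0, 61]]]

def Spec_convertKeyListToBase62 (base10keys : List (List (List Int))) (out : List (List String)) : Prop := out = convertKeyListToBase62_alt base10keys
instance (base10keys : List (List (List Int))) (out : List (List String)) : Decidable (Spec_convertKeyListToBase62 base10keys out) := by unfold Spec_convertKeyListToBase62; infer_instance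

-- ===== CLAIM (what is proved, stated in full; the proofs are below) =====
def Claim_equal_convertKeyListToBase62 : Prop := ∀ (base10keys : List (List (List Int))), Dom_convertKeyListToBase62 base10keys → Pre_convertKeyListToBase62 base10keys → Spec_convertKeyListToBase62 base10keys (convertKeyListToBase62 base10keys)

-- ===== LEMMAS AND PROOFS =====

-- the two digit tables agree: A's r-th one-character string is B's r-th character
set_option maxRecDepth 8192 in
theorem pvTab_agree : ∀ r : Nat, r < 62 →
    (PySem.List.pyGet? pvTabA (Int.ofNat r)).getD "" = String.ofList [pvTabB.getD r ' '] := by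
  decide

-- accumulator lemma for B's while-loop
theorem pvB62Loop_append (x : Int) (ds : List Char) :
    pvB62Loop x ds = ds ++ pvB62Loop x [] := by
  by_cases h : 0 < x
  · conv_lhs => rw [pvB62Loop]
    conv_rhs => rw [pvB62Loop]
    simp only [dif_pos h]
    rw [pvB62Loop_append (PySem.Int.floordiv x 62) (ds ++ [pvTabB.getD (PySem.Int.mod x 62).toNat ' ']),
        pvB62Loop_append (PySem.Int.floordiv x 62) ([] ++ [pvTabB.getD (PySem.Int.mod x 62).toNat ' '])]
    simp
  · conv_lhs => rw [pvB62Loop]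
    conv_rhs => rw [pvB62Loop]
    simp [h]
  termination_by x.toNat
  decreasing_by
    all_goals
      have h62 : PySem.Int.floordiv x 62 = x / 62 := PySem.Int.floordiv_eq_ediv_of_pos (by omega)
      omega

-- one unrolling of B's loop from the empty accumulator
theorem pvB62Loop_nil_pos (x : Int) (h : 0 < x) :
    pvB62Loop x [] =
      pvTabB.getD (PySem.Int.mod x 62).toNat ' ' :: pvB62Loop (PySem.Int.floordiv x 62) [] := by
  conv_lhs => rw [pvB62Loop]
  rw [dif_pos h, pvB62Loop_append]
  simp

-- A's recursive conversion equals B's iterative conversion for every x ≥ 0, given enough fuel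
theorem pvConv_agree : ∀ fuel : Nat, ∀ x : Int, 0 ≤ x → x.toNat < fuel →
    pvConvA fuel x = pvConvB x := by
  intro fuel
  induction fuel with
  | zero => intro x _ h; omega
  | succ f ih =>
    intro x hx hf
    have hq : PySem.Int.floordiv x 62 = x / 62 := PySem.Int.floordiv_eq_ediv_of_pos (by omega)
    have hr : PySem.Int.mod x 62 = x % 62 := PySem.Int.mod_eq_emod_of_pos (by omega)
    have hcast : Int.ofNat (x % 62).toNat = x % 62 := by
      simp only [Int.ofNat_eq_natCast]; omega
    have htab := pvTab_agree (x % 62).toNat (by omega)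
    rw [hcast] at htab
    by_cases hq0 : x / 62 = 0
    · -- x < 62
      rw [pvConvA]
      simp only [hq, hr, hq0, beq_self_eq_true, if_true]
      by_cases hx0 : x = 0
      · subst hx0
        rw [pvConvB]
        simpa using pvTab_agree 0 (by omega)
      · rw [pvConvB, if_neg (by simp [hx0])]
        rw [pvB62Loop_nil_pos x (by omega), hq, hq0, hr]
        conv_rhs => rw [pvB62Loop]
        simp only [dif_neg (by omega : ¬ (0:Int) < 0)]
        simp [htab]
    · -- x ≥ 62
      have hq1 : 1 ≤ x / 62 := by omega
      rw [pvConvA]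
      simp only [hq, hr]
      rw [if_neg (by simp [hq0])]
      rw [ih (x / 62) (by omega) (by omega)]
      rw [pvConvB, if_neg (by simp; omega),
          pvConvB, if_neg (by simp; omega)]
      rw [pvB62Loop_nil_pos x (by omega), hq, hr]
      simp [htab]

-- one key pair: A's entry value equals B's entry value
theorem pvPair_agree (p : List Int) (hlen : p.length = 2) (hpos : ∀ v ∈ p, 0 ≤ v) :
    pvConvA (((PySem.List.pyGet? p 0).getD 0).toNat + 1) ((PySem.List.pyGet? p 0).getD 0) ++
      pvConvA (((PySem.List.pyGet? p 1).getD 0).toNat + 1) ((PySem.List.pyGet? p 1).getD 0) =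
    pvPairB p := by
  have hp : ∃ x fx, p = [x, fx] := by
    match p, hlen with
    | [x, fx], _ => exact ⟨x, fx, rfl⟩
  obtain ⟨x, fx, rfl⟩ := hp
  have hx : 0 ≤ x := hpos x (by simp)
  have hfx : 0 ≤ fx := hpos fx (by simp)
  simp only [PySem.List.pyGet?, PySem.List.pyIdx?, pvPairB]
  norm_num
  rw [pvConv_agree _ x hx (by omega), pvConv_agree _ fx hfx (by omega)]

-- inner loop: filling a row of blanks of the right length is mapping over the row
theorem pvInner_agree : ∀ (row : List (List Int)) (pre suf : List String),
    suf.length = row.length → (∀ p ∈ row, p.length = 2 ∧ ∀ v ∈ p, 0 ≤ v) →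
    (row.foldl (fun (st2 : List String × Nat) pair =>
        (st2.1.set st2.2 (pvConvA (((PySem.List.pyGet? pair 0).getD 0).toNat + 1) ((PySem.List.pyGet? pair 0).getD 0) ++
          pvConvA (((PySem.List.pyGet? pair 1).getD 0).toNat + 1) ((PySem.List.pyGet? pair 1).getD 0)), st2.2 + 1))
      (pre ++ suf, pre.length)).1 =
    pre ++ row.map pvPairB := by
  intro row
  induction row with
  | nil =>
    intro pre suf hlen _
    have : suf = [] := List.length_eq_zero_iff.mp (by simpa using hlen)
    subst this; simp
  | cons p row ih =>
    intro pre suf hlen hgood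
    match suf with
    | s :: suf' =>
      simp only [List.foldl_cons]
      have hset : (pre ++ s :: suf').set pre.length
          (pvConvA (((PySem.List.pyGet? p 0).getD 0).toNat + 1) ((PySem.List.pyGet? p 0).getD 0) ++
            pvConvA (((PySem.List.pyGet? p 1).getD 0).toNat + 1) ((PySem.List.pyGet? p 1).getD 0)) =
          (pre ++ [pvPairB p]) ++ suf' := by
        rw [pvPair_agree p (hgood p (by simp)).1 (hgood p (by simp)).2]
        rw [List.set_append]
        simp
      rw [hset]
      have hl : pre.length + 1 = (pre ++ [pvPairB p]).length := by simp
      rw [hl, ih (pre ++ [pvPairB p]) suf'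
            (by simpa using hlen) (fun q hq => hgood q (by simp [hq]))]
      simp

-- outer loop: filling each pre-allocated blank row is mapping over the key list
theorem pvOuter_agree : ∀ (ks : List (List (List Int))) (R0 : List String) (pre : List (List String)),
    (∀ row ∈ ks, row.length = R0.length ∧ ∀ p ∈ row, p.length = 2 ∧ ∀ v ∈ p, 0 ≤ v) →
    (ks.foldl (fun (st : List (List String) × Nat) keysPerWord =>
        (st.1.modify st.2 (fun row =>
          (keysPerWord.foldl (fun (st2 : List String × Nat) pair =>
              (st2.1.set st2.2 (pvConvA (((PySem.List.pyGet? pair 0).getD 0).toNat + 1) ((PySem.List.pyGet? pair 0).getD 0) ++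
                pvConvA (((PySem.List.pyGet? pair 1).getD 0).toNat + 1) ((PySem.List.pyGet? pair 1).getD 0)), st2.2 + 1))
            (row, 0)).1),
         st.2 + 1))
      (pre ++ List.replicate ks.length R0, pre.length)).1 =
    pre ++ ks.map (fun row => row.map pvPairB) := by
  intro ks
  induction ks with
  | nil => intro R0 pre _; simp
  | cons r ks ih =>
    intro R0 pre hgood
    simp only [List.length_cons, List.replicate_succ, List.foldl_cons]
    have hmod : ∀ (f : List String → List String),
        (pre ++ R0 :: List.replicate ks.length R0).modify pre.length f =
        pre ++ f R0 :: List.replicate ks.length R0 := by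
      intro f
      induction pre with
      | nil => simp [List.modify]
      | cons h t iht => simpa [List.modify] using iht
    rw [hmod]
    have hr := hgood r (by simp)
    have hinner := pvInner_agree r [] R0 (by omega) hr.2
    simp only [List.nil_append, List.length_nil] at hinner
    rw [hinner]
    have hcons : pre ++ (r.map pvPairB) :: List.replicate ks.length R0 =
        (pre ++ [r.map pvPairB]) ++ List.replicate ks.length R0 := by
      simp
    have hl : pre.length + 1 = (pre ++ [r.map pvPairB]).length := by simp
    rw [hcons, hl,
        ih R0 (pre ++ [r.map pvPairB])
          (fun row hrow => hgood row (by simp [hrow]))]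
    simp

theorem pvInit_replicate (n m : Nat) :
    (PySem.List.pyRange 0 (Int.ofNat n) 1).map (fun _ =>
      (PySem.List.pyRange 0 (Int.ofNat m) 1).map (fun _ => "")) =
    List.replicate n ((PySem.List.pyRange 0 (Int.ofNat m) 1).map (fun _ => "")) := by
  simp only [Int.ofNat_eq_natCast, PySem.List.pyRange_zero_natCast, List.map_map]
  induction n with
  | zero => rfl
  | succ k ihn =>
    rw [List.range_succ]
    simp only [List.map_append, List.map_cons, List.map_nil, ihn, Function.comp_apply]
    rw [← List.replicate_succ']

-- ===== VERDICT (by name: the statement is the Claim_ definition above) =====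
theorem convertKeyListToBase62_spec : Claim_equal_convertKeyListToBase62 := by
  unfold Claim_equal_convertKeyListToBase62
  intro ks _ hpre
  unfold Spec_convertKeyListToBase62 convertKeyListToBase62 convertKeyListToBase62_alt
  simp only []
  rw [pvInit_replicate]
  have hlen0 : ((PySem.List.pyGet? ks 0).getD []).length = (ks.headD []).length := by
    cases ks with
    | nil => rfl
    | cons h t => simp [PySem.List.pyGet?, PySem.List.pyIdx?]
  have hR0len : ((PySem.List.pyRange 0 (Int.ofNat ((PySem.List.pyGet? ks 0).getD []).length) 1).map
      (fun _ => "")).length = (ks.headD []).length := by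
    rw [← hlen0]
    simp [PySem.List.pyRange_zero_natCast]
  have := pvOuter_agree ks
    ((PySem.List.pyRange 0 (Int.ofNat ((PySem.List.pyGet? ks 0).getD []).length) 1).map (fun _ => ""))
    []
    (by
      intro row hrow
      rw [hR0len]
      exact hpre row hrow)
  simpa using this
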